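-- pv_equiv track=rewrite | github.com/rentton/AdvenOfCode21-22 | Day3/Day3_first.py | gamma_mult_epsilon
-- ===== SOURCE A (Python) =====
-- def gamma_mult_epsilon(zero_one,len_):
--     gamma = ""
--     epsilon = ""
--     for number in range(len_):
--         #Number of zeros > number of ones
--         if zero_one[0][number] > zero_one[1][number]:
--             gamma += "0"
--             epsilon += "1"
--         #Number of ones > number of zeros
--         elif zero_one[1][number] > zero_one[0][number]:
--             gamma += "1"
--             epsilon += "0"
--         else:
--             gamma += "1"
--             epsilon += "0"
--
--     return int(gamma,2)*int(epsilon,2)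
-- ===== SOURCE B (Python) =====
-- def gamma_mult_epsilon(zero_one, len_):
--     # Accumulate gamma directly as an integer; epsilon is gamma's bitwise
--     # complement over len_ bits, i.e. mask - gamma with mask = (1 << len_) - 1.
--     g = 0
--     for number in range(len_):
--         g = 2 * g + (0 if zero_one[0][number] > zero_one[1][number] else 1)
--     mask = (1 << len_) - 1
--     return g * (mask - g)
-- ===== Notes on version B (the rewrite author's own statement) =====
-- stated objective: simpler
-- what changed: B drops both binary-string accumulators and the int(.,2) parses: it accumulates gamma as an integer in one loop and derives epsilon arithmetically as (2^len_-1) - gamma, using that epsilon is gamma's bitwise complement over len_ bits.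
import Mathlib
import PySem

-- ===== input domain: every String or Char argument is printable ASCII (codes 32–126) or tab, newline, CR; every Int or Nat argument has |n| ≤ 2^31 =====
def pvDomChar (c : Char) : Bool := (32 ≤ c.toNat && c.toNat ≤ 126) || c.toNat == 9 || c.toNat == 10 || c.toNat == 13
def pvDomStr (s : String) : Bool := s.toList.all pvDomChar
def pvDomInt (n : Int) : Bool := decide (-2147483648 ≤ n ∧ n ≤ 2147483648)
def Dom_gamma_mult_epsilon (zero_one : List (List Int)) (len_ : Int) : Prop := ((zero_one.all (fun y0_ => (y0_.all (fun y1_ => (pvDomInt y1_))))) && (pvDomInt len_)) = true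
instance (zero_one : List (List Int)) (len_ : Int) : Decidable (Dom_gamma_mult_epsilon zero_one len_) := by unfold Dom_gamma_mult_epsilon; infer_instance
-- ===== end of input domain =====

-- B replaces A's two binary-string accumulators and int(.,2) parses by a single
-- integer accumulator for gamma, deriving epsilon as (2^len_ - 1) - gamma (objective: simpler).


-- ===== PORT A =====
-- hand port of int(s, 2): exact on nonempty strings of '0'/'1' digits (no sign,
-- whitespace, prefix or underscore) — exactly the strings A builds; the empty
-- string (len_ ≤ 0), where Python raises ValueError, is excluded by Pre_.
def pvBin (cs : List Char) : Int :=
  cs.foldl (fun a c => 2 * a + (if c = '1' then 1 else 0)) 0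

-- one iteration of A's loop body (indexing via pyGetD; out-of-range IndexError excluded by Pre_)
def pvStepA (zero_one : List (List Int)) (p : List Char × List Char) (number : Int) :
    List Char × List Char :=
  if PySem.List.pyGetD (PySem.List.pyGetD zero_one 0 []) number 0 >
     PySem.List.pyGetD (PySem.List.pyGetD zero_one 1 []) number 0 then
    (p.1 ++ ['0'], p.2 ++ ['1'])
  else if PySem.List.pyGetD (PySem.List.pyGetD zero_one 1 []) number 0 >
          PySem.List.pyGetD (PySem.List.pyGetD zero_one 0 []) number 0 then
    (p.1 ++ ['1'], p.2 ++ ['0'])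
  else
    (p.1 ++ ['1'], p.2 ++ ['0'])

def gamma_mult_epsilon (zero_one : List (List Int)) (len_ : Int) : Int :=
  let p := (PySem.List.pyRange 0 len_ 1).foldl (pvStepA zero_one) ([], [])
  pvBin p.1 * pvBin p.2

-- ===== PORT B =====
def pvStepB (zero_one : List (List Int)) (g : Int) (number : Int) : Int :=
  2 * g + (if PySem.List.pyGetD (PySem.List.pyGetD zero_one 0 []) number 0 >
              PySem.List.pyGetD (PySem.List.pyGetD zero_one 1 []) number 0 then 0 else 1)

def gamma_mult_epsilon_alt (zero_one : List (List Int)) (len_ : Int) : Int :=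
  let g := (PySem.List.pyRange 0 len_ 1).foldl (pvStepB zero_one) 0
  let mask := (1 : Int) <<< len_.toNat - 1
  g * (mask - g)

-- ===== PRECONDITION & SPEC =====
-- Pre_ = exactly the inputs on which the Python A returns: len_ ≥ 1 (else int('',2)
-- raises ValueError), rows 0 and 1 exist and have at least len_ entries (else IndexError).
def Pre_gamma_mult_epsilon (zero_one : List (List Int)) (len_ : Int) : Prop :=
  1 ≤ len_ ∧ 2 ≤ zero_one.length ∧
  len_ ≤ ((zero_one.getD 0 []).length : Int) ∧ len_ ≤ ((zero_one.getD 1 []).length : Int)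
instance (zero_one : List (List Int)) (len_ : Int) : Decidable (Pre_gamma_mult_epsilon zero_one len_) := by unfold Pre_gamma_mult_epsilon; infer_instance
def pvWitness_gamma_mult_epsilon : List (List Int) × Int := ([[1, 0], [0, 2]], 2)

def Spec_gamma_mult_epsilon (zero_one : List (List Int)) (len_ : Int) (out : Int) : Prop := out = gamma_mult_epsilon_alt zero_one len_
instance (zero_one : List (List Int)) (len_ : Int) (out : Int) : Decidable (Spec_gamma_mult_epsilon zero_one len_ out) := by unfold Spec_gamma_mult_epsilon; infer_instance

-- ===== CLAIM (what is proved, stated in full; the proofs are below) =====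
def Claim_equal_gamma_mult_epsilon : Prop := ∀ (zero_one : List (List Int)) (len_ : Int), Dom_gamma_mult_epsilon zero_one len_ → Pre_gamma_mult_epsilon zero_one len_ → Spec_gamma_mult_epsilon zero_one len_ (gamma_mult_epsilon zero_one len_)

-- ===== LEMMAS AND PROOFS =====

lemma pvBin_append (xs : List Char) (c : Char) :
    pvBin (xs ++ [c]) = 2 * pvBin xs + (if c = '1' then 1 else 0) := by
  simp [pvBin, List.foldl_append]

-- the loop invariant: after m iterations, A's gamma string parses to B's accumulator g
-- and A's epsilon string parses to 2^m - 1 - g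
lemma pv_step (zo : List (List Int)) (n : Int) (p : List Char × List Char) (g : Int) (m : Nat)
    (h1 : pvBin p.1 = g) (h2 : pvBin p.2 = 2 ^ m - 1 - g) :
    pvBin (pvStepA zo p n).1 = pvStepB zo g n ∧
    pvBin (pvStepA zo p n).2 = 2 ^ (m + 1) - 1 - pvStepB zo g n := by
  unfold pvStepA pvStepB
  split_ifs <;> simp [pvBin_append, h1, h2, pow_succ] <;> ring

lemma pv_loop_inv (zero_one : List (List Int)) (m : Nat) :
    pvBin (((PySem.List.pyRange 0 (m : Int) 1).foldl (pvStepA zero_one) ([], [])).1) =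
      (PySem.List.pyRange 0 (m : Int) 1).foldl (pvStepB zero_one) 0 ∧
    pvBin (((PySem.List.pyRange 0 (m : Int) 1).foldl (pvStepA zero_one) ([], [])).2) =
      2 ^ m - 1 - (PySem.List.pyRange 0 (m : Int) 1).foldl (pvStepB zero_one) 0 := by
  induction m with
  | zero => simp [pvBin]
  | succ k ih =>
    have hk : (0 : Int) ≤ (k : Int) := Int.natCast_nonneg k
    have hsp : ((k + 1 : Nat) : Int) = (k : Int) + 1 := by push_cast; ring
    rw [hsp, PySem.List.pyRange_one_succ_right hk,
        List.foldl_append, List.foldl_append]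
    obtain ⟨ih1, ih2⟩ := ih
    simp only [List.foldl_cons, List.foldl_nil]
    exact pv_step zero_one (k : Int) _ _ k ih1 ih2

-- ===== VERDICT (by name: the statement is the Claim_ definition above) =====
theorem gamma_mult_epsilon_spec : Claim_equal_gamma_mult_epsilon := by
  intro zero_one len_ _ hpre
  unfold Spec_gamma_mult_epsilon gamma_mult_epsilon gamma_mult_epsilon_alt
  obtain ⟨h1, -, -, -⟩ := hpre
  have hlen : ((len_.toNat : Nat) : Int) = len_ := Int.toNat_of_nonneg (by omega)
  simp only []
  rw [← hlen]
  obtain ⟨hg, he⟩ := pv_loop_inv zero_one len_.toNat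
  rw [hg, he]
  have hshift : ((1 : Int) <<< len_.toNat) = 2 ^ len_.toNat := by
    rw [Int.shiftLeft_eq]; ring
  simp only [Int.toNat_natCast]
  rw [hshift]
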